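-- pv_equiv track=rewrite | github.com/Daveyuwang/paperpilot | backend/app/ingestion/concept_extractor.py | _group_chunks_by_section
-- ===== SOURCE A (Python) =====
-- def _group_chunks_by_section(chunks: list[dict]) -> list[list[dict]]:
--     """
--     Group chunks by ``section_title``.  Sections whose total character count
--     is < 200 are merged into the previous group so that very short sections
--     don't produce poor LLM output.
--     """
--     groups: list[list[dict]] = []
--     current_section: str | None = None
--     current_group: list[dict] = []
--
--     for chunk in chunks:
--         section = (chunk.get("section_title") or "Main Body").strip()
--         if section != current_section:
--             if current_group:
--                 groups.append(current_group)
--             current_group = [chunk]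
--             current_section = section
--         else:
--             current_group.append(chunk)
--
--     if current_group:
--         groups.append(current_group)
--
--     # Merge small sections into the previous group
--     merged: list[list[dict]] = []
--     for group in groups:
--         total_chars = sum(
--             len((c.get("content") or "").strip()) for c in group
--         )
--         if merged and total_chars < 200:
--             merged[-1].extend(group)
--         else:
--             merged.append(group)
--
--     return merged
-- ===== SOURCE B (Python) =====
-- def _group_chunks_by_section(chunks: list[dict]) -> list[list[dict]]:
--     """Single fused pass: group by section and apply the <200-char merge inline."""
--     merged: list[list[dict]] = []
--     current_section: str | None = None
--     current_group: list[dict] = []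
--     total = 0  # running char total of current_group
--
--     def close():
--         if current_group:
--             if merged and total < 200:
--                 merged[-1].extend(current_group)
--             else:
--                 merged.append(current_group)
--
--     for chunk in chunks:
--         section = (chunk.get("section_title") or "Main Body").strip()
--         clen = len((chunk.get("content") or "").strip())
--         if section != current_section:
--             close()
--             current_group = [chunk]
--             current_section = section
--             total = clen
--         else:
--             current_group.append(chunk)
--             total += clen
--     close()
--     return merged
-- ===== Notes on version B (the rewrite author's own statement) =====
-- stated objective: alternative
-- what changed: Fused A's two passes (build section groups, then a second merge pass recomputing each group's character total) into one pass that keeps a running char total and decides append-vs-merge inline when a section closes.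
import Mathlib
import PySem

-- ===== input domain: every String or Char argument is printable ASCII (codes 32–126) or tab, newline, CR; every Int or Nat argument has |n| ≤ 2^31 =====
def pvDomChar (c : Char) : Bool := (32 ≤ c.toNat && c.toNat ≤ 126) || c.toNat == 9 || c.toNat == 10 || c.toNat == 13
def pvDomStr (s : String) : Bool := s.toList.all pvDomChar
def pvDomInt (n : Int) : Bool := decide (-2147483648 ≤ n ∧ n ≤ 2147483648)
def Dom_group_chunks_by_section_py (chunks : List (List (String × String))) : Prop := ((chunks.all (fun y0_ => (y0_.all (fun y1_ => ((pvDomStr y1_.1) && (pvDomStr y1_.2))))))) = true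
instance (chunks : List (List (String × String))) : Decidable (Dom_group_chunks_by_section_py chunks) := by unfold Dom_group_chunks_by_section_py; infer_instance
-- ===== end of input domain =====

-- B fuses A's two passes (group by section, then merge <200-char groups) into one pass with a running char total; same cost, different decomposition.


-- ===== PORT A =====
-- shared helpers: both Pythons compute section titles and content lengths with the
-- same expressions, so a common helper is used by both ports.
def pvOrStr (o : Option String) (dflt : String) : String :=
  match o with
  | none => dflt
  | some s => if s = "" then dflt else s   -- Python 'or': "" is falsy

def pvSectionOf (chunk : List (String × String)) : String :=
  PySem.Str.strip (pvOrStr ((PySem.Dict.mk chunk).get? "section_title") "Main Body")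

def pvClen (chunk : List (String × String)) : Nat :=
  (PySem.Str.len (PySem.Str.strip (pvOrStr ((PySem.Dict.mk chunk).get? "content") ""))).toNat

-- A, pass 1: fold over chunks building (groups, current_section, current_group)
def pvGroupStep
    (st : List (List (List (String × String))) × Option String × List (List (String × String)))
    (chunk : List (String × String)) :
    List (List (List (String × String))) × Option String × List (List (String × String)) :=
  let (groups, cs, cg) := st
  let sec := pvSectionOf chunk
  if some sec ≠ cs then
    ((if cg.isEmpty then groups else groups ++ [cg]), some sec, [chunk])
  else
    (groups, cs, cg ++ [chunk])

-- A, pass 2: total_chars of a group, then the merge step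
def pvTotalChars (g : List (List (String × String))) : Nat :=
  g.foldl (fun acc c => acc + pvClen c) 0

def pvMergeStep (merged : List (List (List (String × String))))
    (group : List (List (String × String))) : List (List (List (String × String))) :=
  if merged.isEmpty = false ∧ pvTotalChars group < 200 then
    merged.dropLast ++ [merged.getLastD [] ++ group]
  else
    merged ++ [group]

def group_chunks_by_section_py (chunks : List (List (String × String))) :
    List (List (List (String × String))) :=
  let st := chunks.foldl pvGroupStep ([], none, [])
  let groups := if st.2.2.isEmpty then st.1 else st.1 ++ [st.2.2]
  groups.foldl pvMergeStep []

-- ===== PORT B =====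
-- single fused pass: state = (merged, current_section, current_group, running total)
def pvCloseB (merged : List (List (List (String × String))))
    (cg : List (List (String × String))) (tot : Nat) :
    List (List (List (String × String))) :=
  if cg.isEmpty then merged
  else if merged.isEmpty = false ∧ tot < 200 then
    merged.dropLast ++ [merged.getLastD [] ++ cg]
  else
    merged ++ [cg]

def pvFuseStep
    (st : List (List (List (String × String))) × Option String × List (List (String × String)) × Nat)
    (chunk : List (String × String)) :
    List (List (List (String × String))) × Option String × List (List (String × String)) × Nat :=
  let (merged, cs, cg, tot) := st
  let sec := pvSectionOf chunk
  if some sec ≠ cs then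
    (pvCloseB merged cg tot, some sec, [chunk], pvClen chunk)
  else
    (merged, cs, cg ++ [chunk], tot + pvClen chunk)

def group_chunks_by_section_py_alt (chunks : List (List (String × String))) :
    List (List (List (String × String))) :=
  let st := chunks.foldl pvFuseStep ([], none, [], 0)
  pvCloseB st.1 st.2.2.1 st.2.2.2

-- ===== PRECONDITION & SPEC =====
def Spec_group_chunks_by_section_py (chunks : List (List (String × String))) (out : List (List (List (String × String)))) : Prop := out = group_chunks_by_section_py_alt chunks
instance (chunks : List (List (String × String))) (out : List (List (List (String × String)))) : Decidable (Spec_group_chunks_by_section_py chunks out) := by unfold Spec_group_chunks_by_section_py; infer_instance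

-- ===== CLAIM (what is proved, stated in full; the proofs are below) =====
def Claim_equal_group_chunks_by_section_py : Prop := ∀ (chunks : List (List (String × String))), Dom_group_chunks_by_section_py chunks → Spec_group_chunks_by_section_py chunks (group_chunks_by_section_py chunks)

-- ===== LEMMAS AND PROOFS =====
lemma pvTotalChars_append_one (g : List (List (String × String))) (c : List (String × String)) :
    pvTotalChars (g ++ [c]) = pvTotalChars g + pvClen c := by
  simp [pvTotalChars]

lemma pvCloseB_eq (merged : List (List (List (String × String))))
    (cg : List (List (String × String))) (tot : Nat) (h : tot = pvTotalChars cg) :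
    pvCloseB merged cg tot = if cg.isEmpty then merged else pvMergeStep merged cg := by
  simp [pvCloseB, pvMergeStep, h]

-- main invariant: the fused fold, started from a merged list that is the merge-fold of
-- the groups accumulated so far (with tot the running total of the open group), agrees
-- with running A's two passes from the corresponding state.
lemma pvFuse_invariant (chunks : List (List (String × String)))
    (merged groups : List (List (List (String × String))))
    (cs : Option String) (cg : List (List (String × String))) (tot : Nat)
    (htot : tot = pvTotalChars cg)
    (hm : merged = groups.foldl pvMergeStep []) :
    (let st := chunks.foldl pvFuseStep (merged, cs, cg, tot)
     pvCloseB st.1 st.2.2.1 st.2.2.2)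
    = (let st := chunks.foldl pvGroupStep (groups, cs, cg)
       let groups' := if st.2.2.isEmpty then st.1 else st.1 ++ [st.2.2]
       groups'.foldl pvMergeStep []) := by
  induction chunks generalizing merged groups cs cg tot with
  | nil =>
      simp only [List.foldl_nil]
      rw [pvCloseB_eq _ _ _ htot]
      by_cases h : cg.isEmpty
      · simp [h, hm]
      · simp [h, hm, List.foldl_append]
  | cons c rest ih =>
      simp only [List.foldl_cons, pvFuseStep, pvGroupStep]
      by_cases h : some (pvSectionOf c) ≠ cs
      · rw [if_pos h, if_pos h]
        apply ih
        · simp [pvTotalChars]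
        · rw [pvCloseB_eq _ _ _ htot]
          by_cases hcg : cg.isEmpty
          · simp [hcg, hm]
          · simp [hcg, hm, List.foldl_append]
      · rw [if_neg h, if_neg h]
        apply ih
        · rw [htot, pvTotalChars_append_one]
        · exact hm

-- ===== VERDICT (by name: the statement is the Claim_ definition above) =====
theorem group_chunks_by_section_py_spec : Claim_equal_group_chunks_by_section_py := by
  intro chunks _
  unfold Spec_group_chunks_by_section_py group_chunks_by_section_py group_chunks_by_section_py_alt
  exact (pvFuse_invariant chunks [] [] none [] 0 rfl rfl).symm
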